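-- pv_equiv track=rewrite | github.com/NamisMe/Algorithm | 프로그래머스/1/1845. 폰켓몬/폰켓몬.py | solution
-- ===== SOURCE A (Python) =====
-- def solution(nums):
--     # 해시 초기화
--     pokemon_hash = {}
--
--     # nums 배열에서 pokemon_hash 만들기
--     for num in nums:
--         if num in pokemon_hash:
--             pokemon_hash[num] += 1
--         else:
--             pokemon_hash[num] = 1
--
--     # 전체 포켓몬의 수, 유일한 폰켓몬 수
--     total_count = len(nums)
--     unique_count = len(pokemon_hash)
--
--     # N/2 와 유일한 폰켓몬 종류의 수를 비교 ->
--     # 그 중 작은 값을 찾으면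
--     # 최대로 가질 수 있는 다양한 폰켓몬의 수를 구하시오.
--     max_types = min(total_count // 2, unique_count)
--
--     return max_types
-- ===== SOURCE B (Python) =====
-- def solution(nums):
--     # Sort-then-adjacent-scan: count distinct values by walking the sorted
--     # copy once and incrementing whenever the value changes.
--     ordered = sorted(nums)
--     distinct = 0
--     prev = None
--     for x in ordered:
--         if prev is None or x != prev:
--             distinct += 1
--         prev = x
--     return min(len(nums) // 2, distinct)
-- ===== Notes on version B (the rewrite author's own statement) =====
-- stated objective: alternative
-- what changed: Replaces A's hash-table frequency dict (whose size gives the distinct count) with a sort followed by a single adjacent-comparison scan that counts value changes.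
import Mathlib
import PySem

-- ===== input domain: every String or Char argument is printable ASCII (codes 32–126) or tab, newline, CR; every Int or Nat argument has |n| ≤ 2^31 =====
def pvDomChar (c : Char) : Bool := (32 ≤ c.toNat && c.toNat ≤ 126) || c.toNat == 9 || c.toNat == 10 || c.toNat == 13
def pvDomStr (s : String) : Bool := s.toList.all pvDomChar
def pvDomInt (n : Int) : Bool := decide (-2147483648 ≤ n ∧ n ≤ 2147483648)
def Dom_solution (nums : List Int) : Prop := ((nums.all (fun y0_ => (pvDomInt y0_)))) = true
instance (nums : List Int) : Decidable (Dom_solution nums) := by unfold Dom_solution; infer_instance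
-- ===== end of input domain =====

-- B replaces A's frequency-dict distinct count by a sort plus one adjacent-comparison scan (alternative algorithm, same results).

-- ===== PORT A =====
def solution (nums : List Int) : Int :=
  let d := nums.foldl
    (fun (d : PySem.Dict Int Int) num =>
      if d.contains num then d.insert num (d.getD num 0 + 1) else d.insert num 1)
    PySem.Dict.empty
  let total_count := PySem.List.len nums
  let unique_count := (d.size : Int)
  min (PySem.Int.floordiv total_count 2) unique_count

-- ===== PORT B =====
def solution_alt (nums : List Int) : Int :=
  let ordered := PySem.List.sorted nums (fun x => x) false
  let st := ordered.foldl
    (fun (st : Int × Option Int) x =>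
      (if st.2 = none ∨ some x ≠ st.2 then st.1 + 1 else st.1, some x))
    (0, none)
  min (PySem.Int.floordiv (PySem.List.len nums) 2) st.1

-- ===== PRECONDITION & SPEC =====
def Spec_solution (nums : List Int) (out : Int) : Prop := out = solution_alt nums
instance (nums : List Int) (out : Int) : Decidable (Spec_solution nums out) := by unfold Spec_solution; infer_instance

-- ===== CLAIM (what is proved, stated in full; the proofs are below) =====
def Claim_equal_solution : Prop := ∀ (nums : List Int), Dom_solution nums → Spec_solution nums (solution nums)

-- ===== LEMMAS AND PROOFS =====

-- two nodup lists with the same members have the same length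
theorem pv_len_eq_of_nodup_mem (l₁ l₂ : List Int) (h1 : l₁.Nodup) (h2 : l₂.Nodup)
    (hm : ∀ a, a ∈ l₁ ↔ a ∈ l₂) : l₁.length = l₂.length :=
  ((List.perm_ext_iff_of_nodup h1 h2).mpr hm).length_eq

-- A's loop body is a single insert
theorem pv_body_eq (d : PySem.Dict Int Int) (x : Int) :
    (if d.contains x then d.insert x (d.getD x 0 + 1) else d.insert x 1)
      = d.insert x (d.getD x 0 + 1) := by
  by_cases h : d.contains x = true
  · simp [h]
  · have h' : d.contains x = false := by simpa using h
    rw [if_neg (by simp [h']), PySem.Dict.getD_of_not_contains d 0 h']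
    norm_num

-- dedup length of a cons with minimal head
theorem pv_dedup_cons_min (y : Int) (r : List Int) (h : ∀ z ∈ r, y ≤ z) :
    (y :: r).dedup.length = 1 + (r.filter (fun z => decide (y < z))).dedup.length := by
  have hnd1 : (y :: r).dedup.Nodup := List.nodup_dedup _
  have hnd2 : (y :: (r.filter (fun z => decide (y < z))).dedup).Nodup := by
    refine List.nodup_cons.mpr ⟨?_, List.nodup_dedup _⟩
    intro hy
    have := List.of_mem_filter (List.mem_dedup.mp hy)
    simp at this
  have := pv_len_eq_of_nodup_mem _ _ hnd1 hnd2 (by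
    intro a
    simp only [List.mem_dedup, List.mem_cons, List.mem_filter, decide_eq_true_eq]
    constructor
    · rintro (rfl | ha)
      · exact Or.inl rfl
      · by_cases hay : a = y
        · exact Or.inl hay
        · exact Or.inr ⟨ha, lt_of_le_of_ne (h a ha) (fun e => hay e.symm)⟩
    · rintro (rfl | ⟨ha, _⟩)
      · exact Or.inl rfl
      · exact Or.inr ha)
  simp at this
  omega

-- B's scan invariant on a sorted tail
theorem pv_scan_aux (t : List Int) :
    ∀ (x d : Int), t.Pairwise (· ≤ ·) → (∀ y ∈ t, x ≤ y) →
    (t.foldl (fun (st : Int × Option Int) v =>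
        (if st.2 = none ∨ some v ≠ st.2 then st.1 + 1 else st.1, some v)) (d, some x)).1
      = d + ((t.filter (fun z => decide (x < z))).dedup.length : Int) := by
  induction t with
  | nil => intro x d _ _; simp
  | cons y r ih =>
    intro x d hp hx
    have hyr : ∀ z ∈ r, y ≤ z := fun z hz => List.rel_of_pairwise_cons hp hz
    have hpr : r.Pairwise (· ≤ ·) := hp.of_cons
    by_cases hxy : y = x
    · subst hxy
      simp only [List.foldl_cons, List.filter_cons]
      have : ¬ ((some y : Option Int) = none ∨ some y ≠ some y) := by simp
      rw [if_neg this]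
      simp only [lt_irrefl, decide_false]
      exact ih y d hpr hyr
    · have hlt : x < y := lt_of_le_of_ne (hx y (List.mem_cons_self)) (fun e => hxy e.symm)
      simp only [List.foldl_cons]
      have hc : ((some x : Option Int) = none ∨ some y ≠ some x) := by
        right; simpa using hxy
      rw [if_pos hc]
      have := ih y (d + 1) hpr hyr
      rw [this]
      have hfil : r.filter (fun z => decide (x < z)) = r :=
        List.filter_eq_self.mpr (fun z hz => by
          simpa using lt_of_lt_of_le hlt (hyr z hz))
      have hlen : ((y :: r).filter (fun z => decide (x < z))).dedup.length
          = 1 + (r.filter (fun z => decide (y < z))).dedup.length := by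
        rw [List.filter_cons, if_pos (by simpa using hlt), hfil]
        exact pv_dedup_cons_min y r hyr
      rw [hlen]
      push_cast
      ring

-- B's distinct count is the dedup length of nums
theorem pv_alt_distinct (nums : List Int) :
    ((PySem.List.sorted nums (fun x => x) false).foldl (fun (st : Int × Option Int) x =>
        (if st.2 = none ∨ some x ≠ st.2 then st.1 + 1 else st.1, some x)) (0, none)).1
      = (nums.dedup.length : Int) := by
  have hperm : (PySem.List.sorted nums (fun x => x) false).Perm nums :=
    PySem.List.sorted_perm _ _ _
  have hdl : (PySem.List.sorted nums (fun x => x) false).dedup.length = nums.dedup.length :=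
    (hperm.dedup).length_eq
  have hp : (PySem.List.sorted nums (fun x => x) false).Pairwise (· ≤ ·) := by
    simpa using PySem.List.sorted_pairwise nums (fun x => x)
  rw [← hdl]
  cases hs : PySem.List.sorted nums (fun x => x) false with
  | nil => simp
  | cons x t =>
    rw [hs] at hp
    have hxt : ∀ y ∈ t, x ≤ y := fun z hz => List.rel_of_pairwise_cons hp hz
    simp only [List.foldl_cons, true_or, if_true]
    rw [pv_scan_aux t x (0 + 1) hp.of_cons hxt]
    rw [pv_dedup_cons_min x t hxt]
    push_cast
    ring

-- A's dict size is the dedup length of nums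
theorem pv_a_size (nums : List Int) :
    ((nums.foldl
      (fun (d : PySem.Dict Int Int) num =>
        if d.contains num then d.insert num (d.getD num 0 + 1) else d.insert num 1)
      PySem.Dict.empty).size : Int) = (nums.dedup.length : Int) := by
  have hfold : nums.foldl
      (fun (d : PySem.Dict Int Int) num =>
        if d.contains num then d.insert num (d.getD num 0 + 1) else d.insert num 1)
      PySem.Dict.empty
      = nums.foldl (fun (d : PySem.Dict Int Int) num => d.insert num (d.getD num 0 + 1))
          PySem.Dict.empty := by
    apply PySem.List.foldl_congr_mem
    intro d x _; exact pv_body_eq d x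
  rw [hfold]
  have hkeys : (nums.foldl (fun (d : PySem.Dict Int Int) num => d.insert num (d.getD num 0 + 1))
      PySem.Dict.empty).keys = PySem.Set.ofList nums := by
    rw [PySem.Dict.keys_foldl_insert]
    rfl
  have hsz : (nums.foldl (fun (d : PySem.Dict Int Int) num => d.insert num (d.getD num 0 + 1))
      PySem.Dict.empty).size = (PySem.Set.ofList nums).length := by
    show (nums.foldl _ PySem.Dict.empty).items.length = _
    rw [← hkeys]
    simp [PySem.Dict.keys]
  rw [hsz]
  congr 1
  exact pv_len_eq_of_nodup_mem _ _ (PySem.Set.nodup_ofList nums) (List.nodup_dedup nums)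
    (fun a => by simp [PySem.Set.mem_ofList, List.mem_dedup])

-- ===== VERDICT (by name: the statement is the Claim_ definition above) =====
theorem solution_spec : Claim_equal_solution := by
  intro nums _
  show solution nums = solution_alt nums
  simp only [solution, solution_alt]
  rw [pv_alt_distinct nums, pv_a_size nums]
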